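-- pv_equiv track=rewrite | github.com/ReasonsForWait/Python | programmers.py | solution35
-- ===== SOURCE A (Python) =====
-- def solution35(s):
--     result = []
--     count = 0
--     for i in s:
--         if i.isalpha():
--             if count % 2 == 0:
--                 result.append(i.upper())
--             else:
--                 result.append(i.lower())
--
--             count += 1
--
--         else:
--             result.append(i)
--             count = 0
--
--     return "".join(result)
-- ===== SOURCE B (Python) =====
-- def solution35(s):
--     # run-based rewrite: split s into maximal runs of letters / non-letters;
--     # each letter run is alternated by its local position, non-letter runs pass through.
--     out = []
--     i, n = 0, len(s)
--     while i < n: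
--         j = i
--         k = s[i].isalpha()
--         while j < n and s[j].isalpha() == k:
--             j += 1
--         run = s[i:j]
--         if k:
--             out.append("".join(c.upper() if p % 2 == 0 else c.lower()
--                                for p, c in enumerate(run)))
--         else:
--             out.append(run)
--         i = j
--     return "".join(out)
-- ===== Notes on version B (the rewrite author's own statement) =====
-- stated objective: alternative
-- what changed: Replaces the single per-character loop with a running counter by a run-splitting pass: the string is cut into maximal alpha/non-alpha runs and each letter run is recased by its local index parity (the counter always resets at a non-letter, so runs are independent).
import Mathlib
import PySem

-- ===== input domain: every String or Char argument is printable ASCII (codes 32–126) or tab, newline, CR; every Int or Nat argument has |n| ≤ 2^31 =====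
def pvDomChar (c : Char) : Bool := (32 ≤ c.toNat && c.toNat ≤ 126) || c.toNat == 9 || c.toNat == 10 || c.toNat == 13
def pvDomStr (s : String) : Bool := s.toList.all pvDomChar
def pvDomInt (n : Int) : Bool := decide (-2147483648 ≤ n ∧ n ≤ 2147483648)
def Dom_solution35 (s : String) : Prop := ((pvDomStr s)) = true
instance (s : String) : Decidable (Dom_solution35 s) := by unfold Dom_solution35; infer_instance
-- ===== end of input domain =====

-- B replaces A's per-character loop with a counter by splitting the string into maximal
-- alpha/non-alpha runs and recasing each letter run by its local index parity (alternative, same cost).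


-- ===== PORT A =====
-- for i in s: accumulate (result, count)
def solution35 (s : String) : String :=
  String.ofList (s.toList.foldl
    (fun (acc : List Char × Nat) i =>
      if PySem.Chars.isalpha i then
        (acc.1 ++ [if acc.2 % 2 = 0 then PySem.Chars.upperChar i else PySem.Chars.lowerChar i],
         acc.2 + 1)
      else (acc.1 ++ [i], 0))
    ([], 0)).1

-- ===== PORT B =====
-- the inner while loop of Source B: split off the maximal run with the same isalpha key as the head
def pvRuns : List Char → List (Bool × List Char)
  | [] => []
  | x :: xs =>
    let k := PySem.Chars.isalpha x
    (k, x :: xs.takeWhile (fun y => PySem.Chars.isalpha y == k)) ::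
      pvRuns (xs.dropWhile (fun y => PySem.Chars.isalpha y == k))
  termination_by l => l.length
  decreasing_by
    exact Nat.lt_succ_of_le (xs.length_dropWhile_le _)

-- the body of Source B's outer loop: one piece per run
def pvPiece (r : Bool × List Char) : List Char :=
  if r.1 then
    (PySem.List.enumerate r.2).map
      (fun pc => if pc.1 % 2 = 0 then PySem.Chars.upperChar pc.2 else PySem.Chars.lowerChar pc.2)
  else r.2

def solution35_alt (s : String) : String :=
  String.ofList ((pvRuns s.toList).map pvPiece).flatten

-- ===== PRECONDITION & SPEC =====
def Spec_solution35 (s : String) (out : String) : Prop := out = solution35_alt s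
instance (s : String) (out : String) : Decidable (Spec_solution35 s out) := by unfold Spec_solution35; infer_instance

-- ===== CLAIM (what is proved, stated in full; the proofs are below) =====
def Claim_equal_solution35 : Prop := ∀ (s : String), Dom_solution35 s → Spec_solution35 s (solution35 s)

-- ===== LEMMAS AND PROOFS =====

-- A's loop, rephrased as a recursion on the remaining characters with the current counter
def pvGA : Nat → List Char → List Char
  | _, [] => []
  | c, x :: xs =>
    if PySem.Chars.isalpha x then
      (if c % 2 = 0 then PySem.Chars.upperChar x else PySem.Chars.lowerChar x) :: pvGA (c + 1) xs
    else x :: pvGA 0 xs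

theorem pvFold_eq_gA (l : List Char) : ∀ (res : List Char) (c : Nat),
    (l.foldl
      (fun (acc : List Char × Nat) i =>
        if PySem.Chars.isalpha i then
          (acc.1 ++ [if acc.2 % 2 = 0 then PySem.Chars.upperChar i else PySem.Chars.lowerChar i],
           acc.2 + 1)
        else (acc.1 ++ [i], 0))
      (res, c)).1 = res ++ pvGA c l := by
  induction l with
  | nil => intro res c; simp [pvGA]
  | cons x xs ih =>
    intro res c
    by_cases h : PySem.Chars.isalpha x = true <;>
      simp [pvGA, h, List.foldl_cons, ih]

-- the counter is irrelevant when the next character is not a letter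
theorem pvGA_reset (l : List Char) (c c' : Nat)
    (h : l = [] ∨ ∃ y t, l = y :: t ∧ PySem.Chars.isalpha y = false) :
    pvGA c l = pvGA c' l := by
  rcases h with h | ⟨y, t, rfl, hy⟩
  · subst h; rfl
  · simp [pvGA, hy]

theorem pvGA_alpha_run (r : List Char) : ∀ (c : Nat) (rest : List Char),
    (∀ y ∈ r, PySem.Chars.isalpha y = true) →
    pvGA c (r ++ rest) =
      (PySem.List.enumerate r (c : Int)).map
        (fun pc => if pc.1 % 2 = 0 then PySem.Chars.upperChar pc.2 else PySem.Chars.lowerChar pc.2)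
        ++ pvGA (c + r.length) rest := by
  induction r with
  | nil => intro c rest _; simp [PySem.List.enumerate_nil]
  | cons x xs ih =>
    intro c rest hall
    have hx : PySem.Chars.isalpha x = true := hall x (by simp)
    have hpar : ((c : Int) % 2 = 0) ↔ (c % 2 = 0) := by omega
    simp only [List.cons_append, pvGA, hx, PySem.List.enumerate_cons, List.map_cons]
    rw [ih (c + 1) rest (fun y hy => hall y (by simp [hy]))]
    rw [show ((c : Int) + 1) = ((c + 1 : Nat) : Int) by push_cast; ring,
        show c + 1 + xs.length = c + (x :: xs).length by simp; omega]
    by_cases h : c % 2 = 0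
    · have h' : (c : Int) % 2 = 0 := by omega
      simp [h, h']
    · have h' : ¬ ((c : Int) % 2 = 0) := by omega
      simp [h, h']

theorem pvGA_nonalpha_run (r : List Char) : ∀ (c : Nat) (rest : List Char),
    r ≠ [] → (∀ y ∈ r, PySem.Chars.isalpha y = false) →
    pvGA c (r ++ rest) = r ++ pvGA 0 rest := by
  induction r with
  | nil => intro _ _ h; exact absurd rfl h
  | cons x xs ih =>
    intro c rest _ hall
    have hx : PySem.Chars.isalpha x = false := hall x (by simp)
    rcases List.eq_nil_or_concat' xs with rfl | _
    · simp [pvGA, hx]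
    · simp only [List.cons_append, pvGA, hx, Bool.false_eq_true, if_false, List.cons.injEq,
        true_and]
      exact ih 0 rest (by rename_i h; rcases h with ⟨_, _, rfl⟩; simp)
        (fun y hy => hall y (by simp [hy]))

theorem pvGA_eq_runs_aux (n : Nat) : ∀ l : List Char, l.length ≤ n →
    pvGA 0 l = ((pvRuns l).map pvPiece).flatten := by
  induction n with
  | zero =>
    intro l hl
    rw [List.length_eq_zero_iff.mp (Nat.le_zero.mp hl)]
    simp [pvRuns, pvGA]
  | succ n ih =>
    intro l hl
    cases l with
    | nil => simp [pvRuns, pvGA]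
    | cons x xs =>
      rw [pvRuns]
      simp only [List.map_cons, List.flatten_cons]
      rw [← ih (xs.dropWhile (fun y => PySem.Chars.isalpha y == PySem.Chars.isalpha x))
            (le_trans (xs.length_dropWhile_le _) (by simpa using hl))]
      have hsplit : x :: xs =
          (x :: xs.takeWhile (fun y => PySem.Chars.isalpha y == PySem.Chars.isalpha x)) ++
            xs.dropWhile (fun y => PySem.Chars.isalpha y == PySem.Chars.isalpha x) := by
        simp [List.takeWhile_append_dropWhile]
      have hrunall : ∀ y ∈ xs.takeWhile (fun y => PySem.Chars.isalpha y == PySem.Chars.isalpha x),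
          PySem.Chars.isalpha y = PySem.Chars.isalpha x := by
        intro y hy
        simpa using List.mem_takeWhile_imp hy
      have hresthead : xs.dropWhile (fun y => PySem.Chars.isalpha y == PySem.Chars.isalpha x) = [] ∨
          ∃ y t, xs.dropWhile (fun y => PySem.Chars.isalpha y == PySem.Chars.isalpha x) = y :: t ∧
            PySem.Chars.isalpha y ≠ PySem.Chars.isalpha x := by
        cases hr : xs.dropWhile (fun y => PySem.Chars.isalpha y == PySem.Chars.isalpha x) with
        | nil => exact Or.inl rfl
        | cons y t =>
          refine Or.inr ⟨y, t, rfl, ?_⟩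
          have := List.head?_dropWhile_not (fun y => PySem.Chars.isalpha y == PySem.Chars.isalpha x) xs
          rw [hr] at this
          simpa using this
      cases hkv : PySem.Chars.isalpha x with
      | true =>
        rw [hsplit, pvGA_alpha_run _ 0 _
          (by intro y hy; rcases List.mem_cons.mp hy with rfl | hy
              · exact hkv
              · rw [hrunall y hy, hkv])]
        rw [pvGA_reset _ _ 0
          (by rcases hresthead with h | ⟨y, t, ht, hy⟩
              · exact Or.inl h
              · refine Or.inr ⟨y, t, ht, ?_⟩
                rw [hkv] at hy; simpa using hy)]
        simp [pvPiece, hkv]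
      | false =>
        rw [hsplit, pvGA_nonalpha_run _ 0 _ (by simp)
          (by intro y hy; rcases List.mem_cons.mp hy with rfl | hy
              · exact hkv
              · rw [hrunall y hy, hkv])]
        simp [pvPiece, hkv]

theorem pvGA_eq_runs (l : List Char) : pvGA 0 l = ((pvRuns l).map pvPiece).flatten :=
  pvGA_eq_runs_aux l.length l le_rfl

-- ===== VERDICT (by name: the statement is the Claim_ definition above) =====
theorem solution35_spec : Claim_equal_solution35 := by
  intro s _
  unfold Spec_solution35 solution35 solution35_alt
  rw [pvFold_eq_gA s.toList [] 0, pvGA_eq_runs]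
  simp
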